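-- pv_equiv track=rewrite | github.com/awjjt0624/algoritm_study | programmers_level2/jadencase.py | find_space
-- ===== SOURCE A (Python) =====
-- def find_space(s):
--     space_indexes = []
--
--     is_space_continue = False
--     space = ""
--     for index, s_s in enumerate(s, 1):
--         if s_s.isspace():
--             is_space_continue = True
--             space += " "
--         else:
--             if is_space_continue:
--                 space_indexes.append(space)
--             is_space_continue = False
--             space = ""
--
--         if len(s) == index and is_space_continue:
--             space_indexes.append(space)
--
--     return space_indexes
-- ===== SOURCE B (Python) =====
-- def find_space(s):
--     out = []
--     n = len(s)
--     i = 0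
--     while i < n:
--         if s[i].isspace():
--             j = i + 1
--             while j < n and s[j].isspace():
--                 j += 1
--             out.append(" " * (j - i))
--             i = j
--         else:
--             i += 1
--     return out
-- ===== Notes on version B (the rewrite author's own statement) =====
-- stated objective: alternative
-- what changed: B replaces A's per-character enumerate pass with a continuation flag and incremental space-string accumulation by a two-pointer index scanner: the outer loop walks an index, and on hitting whitespace an inner loop jumps straight to the end of the run and emits the whole run at once, so there is no cross-iteration flag or accumulated string and no end-of-string flush.
import Mathlib
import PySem

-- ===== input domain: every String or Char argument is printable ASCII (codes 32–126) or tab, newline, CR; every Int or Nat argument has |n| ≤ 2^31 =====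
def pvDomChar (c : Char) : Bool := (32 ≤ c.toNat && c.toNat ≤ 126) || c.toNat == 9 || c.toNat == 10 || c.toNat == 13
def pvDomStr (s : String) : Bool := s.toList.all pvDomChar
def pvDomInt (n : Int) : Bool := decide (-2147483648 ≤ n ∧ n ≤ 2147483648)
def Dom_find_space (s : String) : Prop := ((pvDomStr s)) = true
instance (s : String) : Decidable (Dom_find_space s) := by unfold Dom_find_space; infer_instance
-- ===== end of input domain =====

-- B is a two-pointer run scanner (outer index loop, inner loop that jumps to the end of each
-- whitespace run) instead of A's per-character pass with a continuation flag: alternative structure.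

-- ===== PORT A =====
-- one iteration of A's for-loop body; state = (space_indexes, is_space_continue, space)
def fsStepA (n : Nat) (st : List String × Bool × String) (p : Int × Char) :
    List String × Bool × String :=
  let space_indexes := st.1
  let is_space_continue := st.2.1
  let space := st.2.2
  let (space_indexes, is_space_continue, space) :=
    if PySem.Chars.isspace p.2 then
      (space_indexes, true, space ++ " ")
    else
      ((if is_space_continue then space_indexes ++ [space] else space_indexes), false, "")
  if (n : Int) == p.1 && is_space_continue then
    (space_indexes ++ [space], is_space_continue, space)
  else
    (space_indexes, is_space_continue, space)

def find_space (s : String) : List String :=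
  let chars := s.toList
  ((PySem.List.enumerate chars 1).foldl (fsStepA chars.length) ([], false, "")).1

-- ===== PORT B =====
-- " " * run
def fsSpaces (run : Nat) : String := String.ofList (List.replicate run ' ')

-- B's inner while loop: advance j while j < n and s[j] is whitespace
def fsInner (s : List Char) (j : Nat) : Nat :=
  if h : j < s.length then
    if PySem.Chars.isspace s[j] then fsInner s (j + 1) else j
  else j
termination_by s.length - j

-- the inner loop never moves j backwards (cited by fsOuter's decreasing_by)
theorem fsInner_ge (s : List Char) (j : Nat) : j ≤ fsInner s j := by
  unfold fsInner
  split
  · split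
    · exact le_trans (Nat.le_succ j) (fsInner_ge s (j + 1))
    · exact le_refl j
  · exact le_refl j
termination_by s.length - j

-- B's outer while loop; state = (out, i)
def fsOuter (s : List Char) (out : List String) (i : Nat) : List String :=
  if h : i < s.length then
    if PySem.Chars.isspace s[i] then
      let j := fsInner s (i + 1)
      fsOuter s (out ++ [fsSpaces (j - i)]) j
    else fsOuter s out (i + 1)
  else out
termination_by s.length - i
decreasing_by
  · have := fsInner_ge s (i + 1); omega
  · omega

def find_space_alt (s : String) : List String :=
  fsOuter s.toList [] 0

-- ===== PRECONDITION & SPEC =====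
def Spec_find_space (s : String) (out : List String) : Prop := out = find_space_alt s
instance (s : String) (out : List String) : Decidable (Spec_find_space s out) := by unfold Spec_find_space; infer_instance

-- ===== CLAIM (what is proved, stated in full; the proofs are below) =====
def Claim_equal_find_space : Prop := ∀ (s : String), Dom_find_space s → Spec_find_space s (find_space s)

-- ===== LEMMAS AND PROOFS =====

-- length of the leading whitespace run
def fsLeading : List Char → Nat
  | [] => 0
  | c :: cs => if PySem.Chars.isspace c then fsLeading cs + 1 else 0

-- canonical run-by-run recursion both ports are reduced to
def fsGo : List Char → List String
  | [] => []
  | c :: cs =>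
    if PySem.Chars.isspace c then
      fsSpaces (fsLeading cs + 1) :: fsGo (cs.drop (fsLeading cs))
    else fsGo cs
termination_by cs => cs.length
decreasing_by
  · simp only [List.length_cons]
    have : (cs.drop (fsLeading cs)).length ≤ cs.length := by
      simpa using List.length_drop_le (fsLeading cs) cs
    omega
  · simp only [List.length_cons]; omega

theorem fsGo_space (c : Char) (cs : List Char) (h : PySem.Chars.isspace c = true) :
    fsGo (c :: cs) = fsSpaces (fsLeading cs + 1) :: fsGo (cs.drop (fsLeading cs)) := by
  rw [fsGo]; simp [h]

theorem fsGo_nonspace (c : Char) (cs : List Char) (h : PySem.Chars.isspace c = false) :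
    fsGo (c :: cs) = fsGo cs := by
  rw [fsGo]; simp [h]

theorem fsSpaces_zero : fsSpaces 0 = "" := rfl

theorem fsSpaces_succ (run : Nat) : fsSpaces run ++ " " = fsSpaces (run + 1) := by
  apply String.ext
  simp [fsSpaces, List.replicate_succ']

-- pending-run form of fsGo: result of the rest of the string given r pending spaces
def fsPre (r : Nat) (cs : List Char) : List String :=
  if r = 0 then fsGo cs
  else fsSpaces (r + fsLeading cs) :: fsGo (cs.drop (fsLeading cs))

theorem fsPre_space (r : Nat) (c : Char) (cs : List Char) (h : PySem.Chars.isspace c = true) :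
    fsPre r (c :: cs) = fsPre (r + 1) cs := by
  unfold fsPre
  by_cases hr : r = 0
  · subst hr
    simp [fsGo_space c cs h, fsLeading, h, Nat.add_comm]
  · simp [hr, fsLeading, h]
    congr 1
    omega

theorem fsPre_nonspace (r : Nat) (c : Char) (cs : List Char) (h : PySem.Chars.isspace c = false) :
    fsPre r (c :: cs) = (if r ≠ 0 then [fsSpaces r] else []) ++ fsGo cs := by
  unfold fsPre
  by_cases hr : r = 0
  · simp [hr, fsGo_nonspace c cs h]
  · simp [hr, fsLeading, h, fsGo_nonspace c cs h]

-- A-side loop invariant: from state (acc, r ≠ 0, " " * r) at position k+1 with k + |cs| = n,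
-- A's fold computes acc ++ fsPre r cs (the in-loop end-of-string flush fires at the last char).
theorem fsA_loop (n : Nat) (cs : List Char) :
    ∀ (k : Nat) (acc : List String) (r : Nat), (r = 0 ∨ cs ≠ []) → k + cs.length = n →
    ((PySem.List.enumerate cs ((k : Int) + 1)).foldl (fsStepA n)
        (acc, decide (r ≠ 0), fsSpaces r)).1
      = acc ++ fsPre r cs := by
  induction cs with
  | nil =>
    intro k acc r hor _
    have hr : r = 0 := by rcases hor with h | h; exact h; exact absurd rfl h
    subst hr
    simp [PySem.List.enumerate_nil, fsPre, fsGo]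
  | cons c cs ih =>
    intro k acc r _ hlen
    rw [PySem.List.enumerate_cons]
    simp only [List.foldl_cons]
    by_cases hsp : PySem.Chars.isspace c = true
    · have hstep : fsStepA n (acc, decide (r ≠ 0), fsSpaces r) ((k : Int) + 1, c)
          = if (n : Int) == (k : Int) + 1 then
              (acc ++ [fsSpaces (r + 1)], true, fsSpaces (r + 1))
            else (acc, true, fsSpaces (r + 1)) := by
        simp [fsStepA, hsp, fsSpaces_succ]
      rcases List.eq_nil_or_concat' cs with hnil | _
      · subst hnil
        simp only [List.length_cons, List.length_nil] at hlen
        have hn : (n : Int) == (k : Int) + 1 := by simp; omega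
        rw [hstep, if_pos hn]
        rw [fsPre_space r c [] hsp]
        simp [PySem.List.enumerate_nil, fsPre, fsLeading, fsGo]
      · have hne : cs ≠ [] := by rintro rfl; simp_all
        have hn : ((n : Int) == (k : Int) + 1) = false := by
          simp only [List.length_cons] at hlen
          have : cs.length ≠ 0 := by simpa using hne
          simp; omega
        rw [hstep, if_neg (by simp [hn])]
        have := ih (k + 1) acc (r + 1) (Or.inr hne) (by simp at hlen ⊢; omega)
        rw [show (decide (r + 1 ≠ 0)) = true by simp] at this
        push_cast at this ⊢
        rw [this, fsPre_space r c cs hsp]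
    · have hsp' : PySem.Chars.isspace c = false := by simpa using hsp
      have hstep : fsStepA n (acc, decide (r ≠ 0), fsSpaces r) ((k : Int) + 1, c)
          = ((if r ≠ 0 then acc ++ [fsSpaces r] else acc), false, "") := by
        simp [fsStepA, hsp']
      rw [hstep]
      have := ih (k + 1) (if r ≠ 0 then acc ++ [fsSpaces r] else acc) 0 (Or.inl rfl)
        (by simp at hlen ⊢; omega)
      rw [show (decide ((0 : Nat) ≠ 0)) = false by simp, fsSpaces_zero] at this
      push_cast at this ⊢
      rw [this, fsPre_nonspace r c cs hsp']
      unfold fsPre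
      by_cases hr : r = 0 <;> simp [hr]

-- the inner loop from index i computes i plus the leading-run length of the suffix at i
theorem fsInner_eq (s : List Char) (i : Nat) :
    fsInner s i = i + fsLeading (s.drop i) := by
  unfold fsInner
  by_cases h : i < s.length
  · have hdrop : s.drop i = s[i] :: s.drop (i + 1) := by
      simpa using (List.drop_eq_getElem_cons h).symm
    by_cases hsp : PySem.Chars.isspace s[i] = true
    · rw [dif_pos h, if_pos hsp, fsInner_eq s (i + 1), hdrop]
      simp [fsLeading, hsp]
      omega
    · rw [dif_pos h, if_neg hsp, hdrop]
      simp [fsLeading, hsp]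
  · rw [dif_neg h]
    have : s.drop i = [] := List.drop_eq_nil_of_le (by omega)
    simp [this, fsLeading]
termination_by s.length - i

-- B-side loop invariant: the outer loop from index i appends fsGo of the suffix at i
theorem fsB_loop (s : List Char) (i : Nat) :
    ∀ (out : List String), fsOuter s out i = out ++ fsGo (s.drop i) := by
  intro out
  unfold fsOuter
  by_cases h : i < s.length
  · have hdrop : s.drop i = s[i] :: s.drop (i + 1) := by
      simpa using (List.drop_eq_getElem_cons h).symm
    by_cases hsp : PySem.Chars.isspace s[i] = true
    · rw [dif_pos h, if_pos hsp]
      have hj : fsInner s (i + 1) = i + 1 + fsLeading (s.drop (i + 1)) := fsInner_eq s (i + 1)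
      have := fsB_loop s (fsInner s (i + 1)) (out ++ [fsSpaces (fsInner s (i + 1) - i)])
      rw [this, hdrop, fsGo_space _ _ hsp]
      have hdd : s.drop (fsInner s (i + 1)) = (s.drop (i + 1)).drop (fsLeading (s.drop (i + 1))) := by
        rw [hj, List.drop_drop]; try congr 1; try omega
      rw [hdd, hj]
      have : i + 1 + fsLeading (s.drop (i + 1)) - i = fsLeading (s.drop (i + 1)) + 1 := by omega
      simp [this]
    · have hsp' : PySem.Chars.isspace s[i] = false := by simpa using hsp
      rw [dif_pos h, if_neg (by simp [hsp'])]
      rw [fsB_loop s (i + 1) out, hdrop, fsGo_nonspace _ _ hsp']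
  · rw [dif_neg h]
    have : s.drop i = [] := List.drop_eq_nil_of_le (by omega)
    simp [this, fsGo]
termination_by s.length - i
decreasing_by
  · have := fsInner_ge s (i + 1); omega
  · omega

-- ===== VERDICT (by name: the statement is the Claim_ definition above) =====
theorem find_space_spec : Claim_equal_find_space := by
  intro s _
  unfold Spec_find_space find_space find_space_alt
  have hA := fsA_loop s.toList.length s.toList 0 [] 0 (Or.inl rfl) (by simp)
  rw [show (decide ((0 : Nat) ≠ 0)) = false by simp, fsSpaces_zero] at hA
  have hB := fsB_loop s.toList 0 []
  simp only [List.drop_zero] at hB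
  push_cast at hA
  simp only [hA, hB, fsPre, List.nil_append]
  simp
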